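-- pv_equiv track=rewrite | github.com/FruitSpec/fsCounter | vision/data/results_collector.py | map_det_2_trck
-- ===== SOURCE A (Python) =====
-- def map_det_2_trck(t2d_mapping, number_of_detections):
--
--     if t2d_mapping is not None:
--         track_ids = []
--
--         d2t = {v: k for k, v in sorted(t2d_mapping.items(), key=lambda item: item[1])}
--         det_ids = list(d2t.keys())
--         for i in range(number_of_detections):
--             if i in det_ids:
--                 track_ids.append(d2t[i])
--             else:
--                 track_ids.append(-1)
--     else:
--         track_ids = [-1 for _ in range(number_of_detections)]
--
--     return track_ids
-- ===== SOURCE B (Python) =====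
-- def map_det_2_trck(t2d_mapping, number_of_detections):
--     track_ids = [-1] * number_of_detections
--     if t2d_mapping is not None:
--         for k, v in sorted(t2d_mapping.items(), key=lambda item: item[1]):
--             if 0 <= v < number_of_detections:
--                 track_ids[v] = k
--     return track_ids
-- ===== Notes on version B (the rewrite author's own statement) =====
-- stated objective: simpler
-- what changed: Instead of building an inverse value->key dict and gathering per detection index with a linear 'i in det_ids' list scan, B allocates the [-1]*n result up front and scatters each sorted mapping entry into its detection slot, unifying the None and non-None branches.
import Mathlib
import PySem

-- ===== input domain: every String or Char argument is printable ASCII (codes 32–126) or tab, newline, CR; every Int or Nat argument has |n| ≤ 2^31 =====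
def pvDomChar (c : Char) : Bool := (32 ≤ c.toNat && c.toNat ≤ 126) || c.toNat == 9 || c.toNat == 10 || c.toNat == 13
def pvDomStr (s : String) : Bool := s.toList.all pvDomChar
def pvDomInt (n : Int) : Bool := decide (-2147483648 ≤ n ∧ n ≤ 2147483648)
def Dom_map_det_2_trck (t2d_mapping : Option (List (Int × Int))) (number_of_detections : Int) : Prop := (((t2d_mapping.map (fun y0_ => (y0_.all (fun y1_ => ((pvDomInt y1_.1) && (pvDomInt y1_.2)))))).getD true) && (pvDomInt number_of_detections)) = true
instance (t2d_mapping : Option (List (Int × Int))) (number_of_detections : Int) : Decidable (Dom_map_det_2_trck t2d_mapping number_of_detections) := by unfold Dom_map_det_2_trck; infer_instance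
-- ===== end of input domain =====

-- B replaces A's inverse value→key dict + per-index membership gather with one [-1]*n
-- allocation and a scatter of each sorted mapping entry into its detection slot.

-- ===== PORT A =====
def map_det_2_trck (t2d_mapping : Option (List (Int × Int))) (number_of_detections : Int) : List Int :=
  match t2d_mapping with
  | some m =>
    -- d2t = {v: k for k, v in sorted(t2d_mapping.items(), key=lambda item: item[1])}
    let d2t : PySem.Dict Int Int :=
      (PySem.List.sorted m (fun item => item.2)).foldl (fun d p => d.insert p.2 p.1) PySem.Dict.empty
    let det_ids := d2t.keys
    (PySem.List.pyRange 0 number_of_detections 1).foldl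
      (fun track_ids i =>
        if det_ids.contains i then track_ids ++ [d2t.getD i 0] else track_ids ++ [-1]) []
  | none => (PySem.List.pyRange 0 number_of_detections 1).map (fun _ => (-1 : Int))

-- ===== PORT B =====
def map_det_2_trck_alt (t2d_mapping : Option (List (Int × Int))) (number_of_detections : Int) : List Int :=
  let track_ids := List.replicate number_of_detections.toNat (-1 : Int)
  match t2d_mapping with
  | none => track_ids
  | some m =>
    (PySem.List.sorted m (fun item => item.2)).foldl
      (fun tr p =>
        if 0 ≤ p.2 ∧ p.2 < number_of_detections then tr.set p.2.toNat p.1 else tr)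
      track_ids

-- ===== PRECONDITION & SPEC =====
def Spec_map_det_2_trck (t2d_mapping : Option (List (Int × Int))) (number_of_detections : Int) (out : List Int) : Prop := out = map_det_2_trck_alt t2d_mapping number_of_detections
instance (t2d_mapping : Option (List (Int × Int))) (number_of_detections : Int) (out : List Int) : Decidable (Spec_map_det_2_trck t2d_mapping number_of_detections out) := by unfold Spec_map_det_2_trck; infer_instance

-- ===== CLAIM (what is proved, stated in full; the proofs are below) =====
def Claim_equal_map_det_2_trck : Prop := ∀ (t2d_mapping : Option (List (Int × Int))) (number_of_detections : Int), Dom_map_det_2_trck t2d_mapping number_of_detections → Spec_map_det_2_trck t2d_mapping number_of_detections (map_det_2_trck t2d_mapping number_of_detections)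

-- ===== LEMMAS AND PROOFS =====

-- the inverse dict's lookup is a "last pair with this value wins" fold over the sorted items
theorem get?_foldl_insert_swap (s : List (Int × Int)) (d : PySem.Dict Int Int) (x : Int) :
    (s.foldl (fun d p => d.insert p.2 p.1) d).get? x
      = s.foldl (fun o p => if p.2 = x then some p.1 else o) (d.get? x) := by
  induction s generalizing d with
  | nil => rfl
  | cons p t ih =>
      simp only [List.foldl_cons, ih]
      congr 1
      rw [PySem.Dict.get?_insert]
      by_cases h : p.2 = x
      · simp [h]
      · rw [if_neg (fun hx : x = p.2 => h hx.symm), if_neg h]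

theorem foldl_opt_getD (s : List (Int × Int)) (x : Int) (o0 : Option Int) (dflt : Int) :
    (s.foldl (fun o p => if p.2 = x then some p.1 else o) o0).getD dflt
      = s.foldl (fun c p => if p.2 = x then p.1 else c) (o0.getD dflt) := by
  induction s generalizing o0 with
  | nil => rfl
  | cons p t ih =>
      simp only [List.foldl_cons, ih]
      by_cases h : p.2 = x <;> simp [h]

theorem length_foldl_set (n : Int) (s : List (Int × Int)) (acc : List Int) :
    (s.foldl (fun tr p => if 0 ≤ p.2 ∧ p.2 < n then tr.set p.2.toNat p.1 else tr) acc).length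
      = acc.length := by
  induction s generalizing acc with
  | nil => rfl
  | cons p t ih =>
      simp only [List.foldl_cons]
      by_cases h : 0 ≤ p.2 ∧ p.2 < n <;> simp [h, ih]

theorem getD_foldl_set (n : Int) (s : List (Int × Int)) (acc : List Int)
    (hlen : acc.length = n.toNat) (j : Nat) (hj : j < n.toNat) :
    (s.foldl (fun tr p => if 0 ≤ p.2 ∧ p.2 < n then tr.set p.2.toNat p.1 else tr) acc).getD j 0
      = s.foldl (fun c p => if p.2 = (j : Int) then p.1 else c) (acc.getD j 0) := by
  induction s generalizing acc with
  | nil => rfl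
  | cons p t ih =>
      simp only [List.foldl_cons]
      by_cases h : 0 ≤ p.2 ∧ p.2 < n
      · rw [if_pos h, ih (acc.set p.2.toNat p.1) (by simp [hlen])]
        congr 1
        by_cases he : p.2 = (j : Int)
        · have hnat : p.2.toNat = j := by omega
          simp [he, List.getD_eq_getElem?_getD,
            show j < acc.length by omega]
        · have hnat : p.2.toNat ≠ j := by omega
          simp [he, List.getD_eq_getElem?_getD, hnat]
      · rw [if_neg h]
        have he : p.2 ≠ (j : Int) := by omega
        rw [if_neg he, ih acc hlen]


-- one slot of A's gathered list is the same last-wins fold, default -1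
theorem A_elem_eq (s : List (Int × Int)) (x : Int) :
    (let d2t : PySem.Dict Int Int := s.foldl (fun d p => d.insert p.2 p.1) PySem.Dict.empty
     if d2t.keys.contains x then d2t.getD x 0 else -1)
      = s.foldl (fun c p => if p.2 = x then p.1 else c) (-1) := by
  simp only []
  set d2t : PySem.Dict Int Int := s.foldl (fun d p => d.insert p.2 p.1) PySem.Dict.empty with hd
  have hget : d2t.get? x = s.foldl (fun o p => if p.2 = x then some p.1 else o) none := by
    rw [hd, get?_foldl_insert_swap]; rfl
  have key : s.foldl (fun c p => if p.2 = x then p.1 else c) (-1)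
      = (d2t.get? x).getD (-1) := by
    rw [hget, foldl_opt_getD]; rfl
  have hc : d2t.keys.contains x = d2t.contains x := by
    rw [PySem.Dict.contains_eq_decide_mem_keys]
    simp
  rw [key, hc, PySem.Dict.contains_eq_isSome_get?]
  rcases hk : d2t.get? x with _ | v
  · simp
  · simp [PySem.Dict.getD_eq_get?_getD, hk]

-- ===== VERDICT (by name: the statement is the Claim_ definition above) =====
theorem map_det_2_trck_spec : Claim_equal_map_det_2_trck := by
  intro t2d n _
  unfold Spec_map_det_2_trck map_det_2_trck map_det_2_trck_alt
  cases t2d with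
  | none =>
      simp [List.map_const', PySem.List.length_pyRange_one]
  | some m =>
      simp only []
      set s := PySem.List.sorted m (fun item => item.2) with hs
      set d2t : PySem.Dict Int Int := s.foldl (fun d p => d.insert p.2 p.1) PySem.Dict.empty with hd
      have hA : (PySem.List.pyRange 0 n 1).foldl
          (fun track_ids i =>
            if d2t.keys.contains i then track_ids ++ [d2t.getD i 0] else track_ids ++ [-1]) []
          = (PySem.List.pyRange 0 n 1).map
              (fun i => if d2t.keys.contains i then d2t.getD i 0 else -1) := by
        have : (fun (track_ids : List Int) (i : Int) =>
            if d2t.keys.contains i then track_ids ++ [d2t.getD i 0] else track_ids ++ [-1])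
            = fun track_ids i => track_ids ++ [if d2t.keys.contains i then d2t.getD i 0 else -1] := by
          funext tr i; by_cases h : i ∈ d2t.keys <;> simp [h]
        rw [this, PySem.List.foldl_append_singleton_eq_map]; rfl
      rw [hA]
      have hlenB := length_foldl_set n s (List.replicate n.toNat (-1 : Int))
      apply List.ext_getElem
      · simp [PySem.List.length_pyRange_one, hlenB]
      · intro j h1 h2
        have hj : j < n.toNat := by
          simpa [PySem.List.length_pyRange_one] using h1
        have hB : (s.foldl (fun tr p => if 0 ≤ p.2 ∧ p.2 < n then tr.set p.2.toNat p.1 else tr)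
              (List.replicate n.toNat (-1 : Int)))[j]
            = s.foldl (fun c p => if p.2 = (j : Int) then p.1 else c) (-1) := by
          rw [← List.getD_eq_getElem _ 0 (by simp [hlenB, hj])]
          rw [getD_foldl_set n s _ (by simp) j hj]
          simp [List.getD_eq_getElem?_getD, hj]
        rw [hB]
        rw [List.getElem_map, PySem.List.getElem_pyRange_one]
        have := A_elem_eq s ((0 : Int) + j)
        simp only [] at this
        rw [← hd] at this
        simpa using this
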